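-- pv_equiv track=rewrite | github.com/ybezginova2016/Python_tasks | 9_TechInterviewProblems/14_MedianMatrix.py | median_matrix
-- ===== SOURCE A (Python) =====
-- def median_matrix(A):
--     if len(A) == 1:
--         vec = A[0]
--         # getting a middle elements of the vec
--         return vec[len(vec) // 2]
--     else:
--         new_list = []
--         for row in range(len(A)):
--             new_list.extend(A[row]) # continuously building
--         # return new_list
--         new_list = sorted(new_list)
--         # getting a middle elements of the vec
--         return new_list[len(new_list)//2]
-- ===== SOURCE B (Python) =====
-- def median_matrix(A):
--     vals = [x for row in A for x in row]
--     k = len(vals) // 2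
--     lo, hi = min(vals), max(vals)
--     while lo < hi:
--         mid = (lo + hi) // 2
--         if sum(1 for x in vals if x <= mid) <= k:
--             lo = mid + 1
--         else:
--             hi = mid
--     return lo
-- ===== Notes on version B (the rewrite author's own statement) =====
-- stated objective: alternative
-- what changed: B never sorts: it binary-searches on the value range, counting elements <= mid in one linear pass per step, and it treats single-row and multi-row matrices uniformly (A's single-row branch skips sorting).
-- intended difference: On single-row matrices whose middle element is displaced by sorting, A returns the unsorted middle element (its single-row branch skips sorting) while B returns the true median (the middle element after sorting), which is the intended value for a median function. — e.g. on median_matrix([[2, 1]]): A returns 1, B returns 2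
import Mathlib
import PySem

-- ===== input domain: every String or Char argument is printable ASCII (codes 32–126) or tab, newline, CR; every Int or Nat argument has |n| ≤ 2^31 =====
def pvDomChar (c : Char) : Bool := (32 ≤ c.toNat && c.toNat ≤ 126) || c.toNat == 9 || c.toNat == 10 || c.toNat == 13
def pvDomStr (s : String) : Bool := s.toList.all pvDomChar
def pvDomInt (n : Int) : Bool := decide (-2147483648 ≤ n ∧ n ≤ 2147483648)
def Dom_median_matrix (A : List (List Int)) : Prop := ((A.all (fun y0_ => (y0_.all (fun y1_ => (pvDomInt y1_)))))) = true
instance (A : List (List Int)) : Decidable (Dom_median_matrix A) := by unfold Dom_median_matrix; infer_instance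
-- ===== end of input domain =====

-- B replaces flatten-and-sort by a binary search on the value range with a linear counting
-- pass per step (no sorting), and treats single- and multi-row matrices uniformly.

-- ===== PORT A =====
def median_matrix (A : List (List Int)) : Int :=
  if A.length = 1 then
    let vec := PySem.List.pyGetD A 0 []
    PySem.List.pyGetD vec (PySem.Int.floordiv (vec.length : Int) 2) 0
  else
    let newList := (PySem.List.pyRange 0 (A.length : Int)).foldl
      (fun acc row => acc ++ PySem.List.pyGetD A row []) []
    let s := PySem.List.sorted newList (fun x => x)
    PySem.List.pyGetD s (PySem.Int.floordiv (s.length : Int) 2) 0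

-- ===== PORT B =====
-- sum(1 for x in vals if x <= m)
def pyCountLE (vals : List Int) (m : Int) : Int :=
  vals.foldl (fun c x => if x ≤ m then c + 1 else c) 0

-- the while-loop of B (value-range binary search)
def bsLoop (vals : List Int) (k : Int) (lo hi : Int) : Int :=
  if h : lo < hi then
    let mid := PySem.Int.floordiv (lo + hi) 2
    if pyCountLE vals mid ≤ k then bsLoop vals k (mid + 1) hi
    else bsLoop vals k lo mid
  else lo
termination_by (hi - lo).toNat
decreasing_by
  · have h1 := (PySem.Int.le_floordiv_iff_mul_le (a := lo + hi) (b := 2) (q := lo) (by norm_num)).mpr (by omega)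
    omega
  · have h2 := (PySem.Int.floordiv_lt_iff_lt_mul (a := lo + hi) (b := 2) (q := hi) (by norm_num)).mpr (by omega)
    omega

def median_matrix_alt (A : List (List Int)) : Int :=
  let vals := A.flatten
  let k := PySem.Int.floordiv (vals.length : Int) 2
  match PySem.List.min? vals (fun x => x), PySem.List.max? vals (fun x => x) with
  | some lo, some hi => bsLoop vals k lo hi
  | _, _ => 0   -- min([]) raises ValueError in Python; outside Pre_

-- ===== PRECONDITION & SPEC =====
-- A raises IndexError exactly when the matrix has no elements at all (the middle-element
-- lookup hits an empty list); Pre_ excludes exactly those inputs.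
def Pre_median_matrix (A : List (List Int)) : Prop := A.flatten ≠ []
instance (A : List (List Int)) : Decidable (Pre_median_matrix A) := by unfold Pre_median_matrix; infer_instance
def pvWitness_median_matrix : List (List Int) := [[3, 1], [2, 5]]

-- On single-row matrices whose middle element is displaced by sorting (reachable only because
-- A's single-row branch skips sorting), A returns the unsorted middle element while B returns
-- the true median (the middle element after sorting), the intended value.
def D_median_matrix (A : List (List Int)) : Prop :=
  A.length = 1 ∧
    (let r := A.flatten
     r.getD (r.length / 2) 0 ≠ (PySem.List.sorted r fun x => x).getD (r.length / 2) 0)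
instance (A : List (List Int)) : Decidable (D_median_matrix A) := by unfold D_median_matrix; infer_instance

def Spec_median_matrix (A : List (List Int)) (out : Int) : Prop :=
  ¬ D_median_matrix A → out = median_matrix_alt A
instance (A : List (List Int)) (out : Int) : Decidable (Spec_median_matrix A out) := by unfold Spec_median_matrix; infer_instance

def pvDiffWitness_median_matrix : List (List Int) := [[2, 1]]
def pvDiffWitnessOut_median_matrix : Int × Int := (1, 2)

-- ===== CLAIM (what is proved, stated in full; the proofs are below) =====
def Claim_unchanged_median_matrix : Prop := ∀ (A : List (List Int)), Dom_median_matrix A → Pre_median_matrix A → Spec_median_matrix A (median_matrix A)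
def Claim_exact_median_matrix : Prop := ∀ (A : List (List Int)), Dom_median_matrix A → Pre_median_matrix A → D_median_matrix A → median_matrix A ≠ median_matrix_alt A
def Claim_changed_median_matrix : Prop := Dom_median_matrix (pvDiffWitness_median_matrix) ∧ Pre_median_matrix (pvDiffWitness_median_matrix) ∧ D_median_matrix (pvDiffWitness_median_matrix) ∧ median_matrix (pvDiffWitness_median_matrix) = pvDiffWitnessOut_median_matrix.1 ∧ median_matrix_alt (pvDiffWitness_median_matrix) = pvDiffWitnessOut_median_matrix.2 ∧ pvDiffWitnessOut_median_matrix.1 ≠ pvDiffWitnessOut_median_matrix.2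

-- ===== LEMMAS AND PROOFS =====

-- counting loop = countP, cast to Int
theorem pyCountLE_eq_countP (vals : List Int) (m : Int) :
    pyCountLE vals m = (vals.countP (fun x => decide (x ≤ m)) : Int) := by
  simpa using PySem.List.foldl_ite_add_one (fun x => x ≤ m) vals 0

-- rank characterisation on a sorted list
theorem countP_gt_iff (S : List Int) (hs : S.Pairwise (fun a b => a ≤ b)) :
    ∀ (kn : Nat) (hk : kn < S.length) (m : Int),
      kn < S.countP (fun x => decide (x ≤ m)) ↔ S[kn] ≤ m := by
  induction S with
  | nil => intro kn hk; simp at hk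
  | cons a t ih =>
    rcases List.pairwise_cons.mp hs with ⟨ha, ht⟩
    intro kn hk m
    by_cases ham : a ≤ m
    · cases kn with
      | zero =>
        simp [ham]
      | succ kn =>
        have := ih ht kn (by simpa using hk) m
        simp only [List.countP_cons, List.getElem_cons_succ]
        simp [ham]
        omega
    · have h0 : t.countP (fun x => decide (x ≤ m)) = 0 := by
        apply List.countP_eq_zero.mpr
        intro x hx
        simp only [decide_eq_true_eq]
        have := ha x hx
        omega
      cases kn with
      | zero =>
        simp [ham, h0]
      | succ kn =>
        have hkt : kn < t.length := by simpa using hk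
        have hm : a ≤ t[kn] := ha _ (List.getElem_mem hkt)
        simp only [List.countP_cons, List.getElem_cons_succ]
        simp [ham, h0]
        omega

-- the binary-search loop converges to the unique t with (k < count ↔ t ≤ m)
theorem bsLoop_eq (vals : List Int) (k t : Int)
    (hc : ∀ m : Int, k < pyCountLE vals m ↔ t ≤ m) :
    ∀ (n : Nat) (lo hi : Int), (hi - lo).toNat ≤ n → lo ≤ t → t ≤ hi →
      bsLoop vals k lo hi = t := by
  intro n
  induction n with
  | zero =>
    intro lo hi h1 h2 h3
    rw [bsLoop]
    have hnl : ¬ lo < hi := by omega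
    simp only [hnl, dite_false]
    omega
  | succ n ih =>
    intro lo hi h1 h2 h3
    rw [bsLoop]
    by_cases hlt : lo < hi
    · simp only [hlt, dite_true]
      have hb1 := (PySem.Int.le_floordiv_iff_mul_le (a := lo + hi) (b := 2) (q := lo) (by norm_num)).mpr (by omega)
      have hb2 := (PySem.Int.floordiv_lt_iff_lt_mul (a := lo + hi) (b := 2) (q := hi) (by norm_num)).mpr (by omega)
      set mid := PySem.Int.floordiv (lo + hi) 2 with hmid
      by_cases hcnt : pyCountLE vals mid ≤ k
      · have : ¬ t ≤ mid := fun hle => absurd ((hc mid).mpr hle) (by omega)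
        simp only [hcnt, if_true]
        exact ih (mid + 1) hi (by omega) (by omega) h3
      · have : t ≤ mid := (hc mid).mp (by omega)
        simp only [hcnt, if_false]
        exact ih lo mid (by omega) h2 this
    · simp only [hlt, dite_false]
      omega

-- B computes the middle element of the sorted flattening
theorem alt_eq_sorted_mid (A : List (List Int)) (h : Pre_median_matrix A) :
    median_matrix_alt A =
      (PySem.List.sorted A.flatten (fun x => x))[A.flatten.length / 2]'(by
        rw [PySem.List.length_sorted]
        have : A.flatten ≠ [] := h
        have : 0 < A.flatten.length := List.length_pos_of_ne_nil this
        omega) := by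
  have hne : A.flatten ≠ [] := h
  set vals := A.flatten with hv
  set S := PySem.List.sorted vals (fun x => x) with hS
  have hlen : S.length = vals.length := PySem.List.length_sorted _ _ _
  have hpos : 0 < vals.length := List.length_pos_of_ne_nil hne
  have hk : vals.length / 2 < S.length := by omega
  set kn : Nat := vals.length / 2 with hkn
  set t : Int := S[kn] with ht
  -- min?/max? succeed on a nonempty list
  obtain ⟨lo, hlo⟩ : ∃ lo, PySem.List.min? vals (fun x => x) = some lo := by
    cases hm : PySem.List.min? vals (fun x => x) with
    | none => exact absurd ((PySem.List.min?_eq_none_iff vals (fun x => x)).mp hm) hne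
    | some lo => exact ⟨lo, rfl⟩
  obtain ⟨hi, hhi⟩ : ∃ hi, PySem.List.max? vals (fun x => x) = some hi := by
    cases hm : PySem.List.max? vals (fun x => x) with
    | none => exact absurd ((PySem.List.max?_eq_none_iff vals (fun x => x)).mp hm) hne
    | some hi => exact ⟨hi, rfl⟩
  have htmem : t ∈ vals := (PySem.List.mem_sorted _ _ _ _).mp (by exact List.getElem_mem _)
  have hlot : lo ≤ t := PySem.List.min?_isMin hlo t htmem
  have hthi : t ≤ hi := PySem.List.max?_isMax hhi t htmem
  -- the characteristic property of t
  have hperm : S.Perm vals := PySem.List.sorted_perm _ _ _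
  have hsortd : S.Pairwise (fun a b => a ≤ b) := PySem.List.sorted_pairwise _ _
  have hchar : ∀ m : Int, ((vals.length / 2 : Nat) : Int) < pyCountLE vals m ↔ t ≤ m := by
    intro m
    rw [pyCountLE_eq_countP, ← hperm.countP_eq]
    have := countP_gt_iff S hsortd kn hk m
    constructor
    · intro hgt; exact this.mp (by exact_mod_cast hgt)
    · intro hle; exact_mod_cast this.mpr hle
  show median_matrix_alt A = t
  simp only [median_matrix_alt, ← hv, hlo, hhi]
  have hkcast : PySem.Int.floordiv (vals.length : Int) 2 = ((vals.length / 2 : Nat) : Int) := by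
    exact_mod_cast PySem.Int.floordiv_natCast vals.length 2
  rw [hkcast]
  exact bsLoop_eq vals _ t hchar (hi - lo).toNat lo hi (le_refl _) hlot hthi

-- A's accumulation loop builds the flattening
theorem newList_eq_flatten (A : List (List Int)) :
    (PySem.List.pyRange 0 (A.length : Int)).foldl
      (fun acc row => acc ++ PySem.List.pyGetD A row []) [] = A.flatten := by
  have hmap := PySem.List.map_pyGetD_pyRange_zero A []
  calc (PySem.List.pyRange 0 (A.length : Int)).foldl
          (fun acc row => acc ++ PySem.List.pyGetD A row []) []
      = ((PySem.List.pyRange 0 (A.length : Int)).map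
          (fun row => PySem.List.pyGetD A row [])).foldl (fun acc x => acc ++ x) [] := by
        rw [List.foldl_map]
    _ = A.foldl (fun acc x => acc ++ x) [] := by
        have : PySem.List.len A = (A.length : Int) := rfl
        rw [← this, hmap]
    _ = A.flatten := by simpa using PySem.List.foldl_append_eq_flatten A []

-- pyGetD at the in-range middle index is getElem
theorem pyGetD_mid (l : List Int) (h : 0 < l.length) :
    PySem.List.pyGetD l (PySem.Int.floordiv (l.length : Int) 2) 0
      = l[l.length / 2]'(by omega) := by
  have hk : PySem.Int.floordiv (l.length : Int) 2 = ((l.length / 2 : Nat) : Int) := by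
    exact_mod_cast PySem.Int.floordiv_natCast l.length 2
  rw [hk, PySem.List.pyGetD_natCast]
  exact List.getD_eq_getElem l 0 (by omega)

-- A's single-row branch returns the middle element of the unsorted row
theorem a_single (v : List Int) (h : 0 < v.length) :
    median_matrix [v] = v[v.length / 2]'(by omega) := by
  unfold median_matrix
  simp only [List.length_cons, List.length_nil, if_true]
  have hget : PySem.List.pyGetD ([v] : List (List Int)) 0 [] = v := by
    simp [PySem.List.pyGetD, PySem.List.pyGet?, PySem.List.pyIdx?]
  rw [hget, pyGetD_mid v h]

-- ===== VERDICT (by name: the statement is the Claim_ definition above) =====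
theorem median_matrix_spec : Claim_unchanged_median_matrix := by
  intro A _ hpre hnd
  have hne : A.flatten ≠ [] := hpre
  have hpos : 0 < A.flatten.length := List.length_pos_of_ne_nil hne
  rw [alt_eq_sorted_mid A hpre]
  by_cases h1 : A.length = 1
  · -- single row; outside D_ its middle element has median rank, hence equals the sorted middle
    obtain ⟨v, rfl⟩ : ∃ v, A = [v] := by
      match A, h1 with
      | [v], _ => exact ⟨v, rfl⟩
    have hvflat : ([v] : List (List Int)).flatten = v := by simp
    have hvpos : 0 < v.length := by simpa [hvflat] using hpos
    have hkv : v.length / 2 < v.length := by omega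
    set S := PySem.List.sorted v (fun x => x) with hS
    have hlenS : S.length = v.length := PySem.List.length_sorted _ _ _
    have hkS : v.length / 2 < S.length := by omega
    have hc : v.getD (v.length / 2) 0 = S.getD (v.length / 2) 0 := by
      by_contra hcc
      exact hnd ⟨rfl, by simpa [hvflat, ← hS] using hcc⟩
    have huniq : v[v.length / 2] = S[v.length / 2]'hkS := by
      rw [← List.getD_eq_getElem v 0 hkv, ← List.getD_eq_getElem S 0 hkS]
      exact hc
    rw [a_single v hvpos, huniq]
    congr 1 <;> simp [hvflat, hS]
  · unfold median_matrix
    simp only [h1, if_false]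
    rw [newList_eq_flatten]
    set S := PySem.List.sorted A.flatten (fun x => x) with hS
    have hlen : S.length = A.flatten.length := PySem.List.length_sorted _ _ _
    rw [pyGetD_mid S (by omega)]
    congr 1
    omega

theorem median_matrix_tight : Claim_exact_median_matrix := by
  intro A _ hpre hd heq
  obtain ⟨h1, hnc⟩ := hd
  obtain ⟨v, rfl⟩ : ∃ v, A = [v] := by
    match A, h1 with
    | [v], _ => exact ⟨v, rfl⟩
  have hvflat : ([v] : List (List Int)).flatten = v := by simp
  have hne : v ≠ [] := by
    intro h; exact hpre (by simp [h])
  have hvpos : 0 < v.length := List.length_pos_of_ne_nil hne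
  have hkv : v.length / 2 < v.length := by omega
  rw [a_single v hvpos, alt_eq_sorted_mid _ hpre] at heq
  set S := PySem.List.sorted v (fun x => x) with hS
  have hlenS : S.length = v.length := PySem.List.length_sorted _ _ _
  have hkS : v.length / 2 < S.length := by omega
  have heq' : v[v.length / 2] = S[v.length / 2]'hkS := by
    rw [heq]; congr 1 <;> simp [hvflat, hS]
  apply hnc
  simp only [hvflat, ← hS]
  rw [List.getD_eq_getElem v 0 hkv, List.getD_eq_getElem S 0 hkS]
  exact heq'

theorem median_matrix_changed : Claim_changed_median_matrix := by
  unfold Claim_changed_median_matrix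
  refine ⟨by decide, by decide, by decide, by decide, ?_, by decide⟩
  -- bsLoop is defined by well-founded recursion, so evaluate B via the lemma
  have := alt_eq_sorted_mid pvDiffWitness_median_matrix (by decide)
  rw [this]
  decide
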